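-- pv_equiv track=rewrite | github.com/Kris465/MemoryBox | RPO/block4/task141.py | is_sum_even
-- ===== SOURCE A (Python) =====
-- def is_sum_even(a, n):
--     total_sum = 0
--
--     for i in range(n):
--         total_sum += a + i
--
--     if total_sum % 2 == 0:
--         return True
--     else:
--         return False
-- ===== SOURCE B (Python) =====
-- def is_sum_even(a, n):
--     m = max(n, 0)
--     return (m * a + m * (m - 1) // 2) % 2 == 0
-- ===== Notes on version B (the rewrite author's own statement) =====
-- stated objective: faster
-- what changed: Replaced the O(n) accumulation loop by the closed-form arithmetic-series sum m*a + m*(m-1)//2 (m = max(n,0)) taken mod 2.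
import Mathlib
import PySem

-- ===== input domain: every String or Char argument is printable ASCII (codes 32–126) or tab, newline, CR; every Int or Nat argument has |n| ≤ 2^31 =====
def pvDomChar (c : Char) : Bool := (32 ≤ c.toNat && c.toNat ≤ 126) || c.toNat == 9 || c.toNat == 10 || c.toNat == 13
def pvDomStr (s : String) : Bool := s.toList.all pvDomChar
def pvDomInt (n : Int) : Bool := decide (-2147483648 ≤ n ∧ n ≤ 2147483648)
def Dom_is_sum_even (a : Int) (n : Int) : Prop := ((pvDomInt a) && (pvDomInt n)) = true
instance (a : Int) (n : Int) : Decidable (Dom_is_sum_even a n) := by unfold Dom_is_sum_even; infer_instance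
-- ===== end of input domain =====

-- B replaces A's O(n) accumulation loop by the closed-form arithmetic-series sum (objective: faster, asymptotic).

-- ===== PORT A =====
def is_sum_even (a : Int) (n : Int) : Bool :=
  let total_sum := (PySem.List.pyRange 0 n 1).foldl (fun s i => s + (a + i)) 0
  if PySem.Int.mod total_sum 2 = 0 then true else false

-- ===== PORT B =====
def is_sum_even_alt (a : Int) (n : Int) : Bool :=
  let m := max n 0
  PySem.Int.mod (m * a + PySem.Int.floordiv (m * (m - 1)) 2) 2 == 0

-- ===== PRECONDITION & SPEC =====
def Spec_is_sum_even (a : Int) (n : Int) (out : Bool) : Prop := out = is_sum_even_alt a n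
instance (a : Int) (n : Int) (out : Bool) : Decidable (Spec_is_sum_even a n out) := by unfold Spec_is_sum_even; infer_instance

-- ===== CLAIM (what is proved, stated in full; the proofs are below) =====
def Claim_equal_is_sum_even : Prop := ∀ (a : Int) (n : Int), Dom_is_sum_even a n → Spec_is_sum_even a n (is_sum_even a n)

-- ===== LEMMAS AND PROOFS =====

-- closed form of A's loop for a nonnegative count k
theorem pv_sum_closed (a : Int) (k : Nat) :
    (PySem.List.pyRange 0 (k : Int) 1).foldl (fun s i => s + (a + i)) 0
      = (k : Int) * a + ((k * (k - 1) / 2 : Nat) : Int) := by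
  induction k with
  | zero => simp [PySem.List.pyRange_one_eq_nil]
  | succ k ih =>
    have h : ((k : Int) + 1) = ((k + 1 : Nat) : Int) := by push_cast; ring
    have hsplit := PySem.List.pyRange_one_succ_right (a := 0) (b := (k : Int)) (by positivity)
    rw [show ((k + 1 : Nat) : Int) = (k : Int) + 1 by push_cast; ring, hsplit,
        List.foldl_append, ih]
    have hnat : (k + 1) * (k + 1 - 1) / 2 = k * (k - 1) / 2 + k := by
      have h2 : (k + 1) * (k + 1 - 1) = k * (k - 1) + k * 2 := by cases k with
        | zero => rfl
        | succ m => simp only [Nat.add_sub_cancel]; ring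
      rw [h2, Nat.add_mul_div_right _ _ (by norm_num)]
    simp only [List.foldl]
    rw [hnat]
    push_cast
    ring

theorem pv_flo (k : Nat) (hk : 1 ≤ k) :
    PySem.Int.floordiv ((k : Int) * ((k : Int) - 1)) 2 = ((k * (k - 1) / 2 : Nat) : Int) := by
  have h1 : ((k : Int) - 1) = ((k - 1 : Nat) : Int) := by omega
  rw [h1]
  exact_mod_cast PySem.Int.floordiv_natCast (k * (k - 1)) 2

-- ===== VERDICT (by name: the statement is the Claim_ definition above) =====
theorem is_sum_even_spec : Claim_equal_is_sum_even := by
  unfold Claim_equal_is_sum_even Spec_is_sum_even is_sum_even is_sum_even_alt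
  intro a n _
  dsimp only
  by_cases hn : n ≤ 0
  · have hmax : max n 0 = 0 := by omega
    rw [PySem.List.pyRange_one_eq_nil hn, hmax]
    norm_num [PySem.Int.mod, List.foldl]
  · replace hn : 0 < n := by omega
    have hk : ((n.toNat : Nat) : Int) = n := by omega
    have hmax : max n 0 = n := by omega
    have hsum := pv_sum_closed a n.toNat
    have hflo := pv_flo n.toNat (by omega)
    rw [hk] at hsum hflo
    rw [hmax, hsum, hflo]
    split <;> rename_i h
    · exact (beq_iff_eq.mpr h).symm
    · exact (beq_eq_false_iff_ne.mpr h).symm
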